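-- pv_equiv track=rewrite | github.com/mozilla/bugbug | bugbug/tools/code_review.py | parse_text_for_dict
-- ===== SOURCE A (Python) =====
-- def parse_text_for_dict(text):
--     file_content = {}
--     current_filename = None
--     current_lines = []
--
--     lines = text.split("\n")
--     for line in lines:
--         if line.startswith("Filename:"):
--             filename = line.split(":", 1)[1].strip()
--             # Remove the first letter and the '/' character from the filename
--             filename = filename[2:]
--             current_filename = filename
--             current_lines = []
--         else:
--             current_lines.append(line)
--
--         # If we have content and filename, store it
--         if current_filename is not None and len(current_lines) > 0:
--             if file_content.get(current_filename) is not None: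
--                 file_content[current_filename] = (
--                     file_content[current_filename] + "\n" + str(line)
--                 )
--             else:
--                 file_content[current_filename] = "\n".join(current_lines)
--
--     return file_content
-- ===== SOURCE B (Python) =====
-- def parse_text_for_dict(text):
--     groups = {}
--     current = None
--     for line in text.split("\n"):
--         if line.startswith("Filename:"):
--             current = line.split(":", 1)[1].strip()[2:]
--         elif current is not None:
--             groups.setdefault(current, []).append(line)
--     return {k: "\n".join(v) for k, v in groups.items()}
-- ===== Notes on version B (the rewrite author's own statement) =====
-- stated objective: simpler
-- what changed: A builds the result dict incrementally, concatenating each content line onto the stored string (with a key-exists test and a join of the tracked current_lines buffer on first insert) inside the line loop; B groups content lines into lists keyed by the current filename and newline-joins each group once in a final comprehension, dropping A's current_lines buffer and per-line string concatenation entirely.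
import Mathlib
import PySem

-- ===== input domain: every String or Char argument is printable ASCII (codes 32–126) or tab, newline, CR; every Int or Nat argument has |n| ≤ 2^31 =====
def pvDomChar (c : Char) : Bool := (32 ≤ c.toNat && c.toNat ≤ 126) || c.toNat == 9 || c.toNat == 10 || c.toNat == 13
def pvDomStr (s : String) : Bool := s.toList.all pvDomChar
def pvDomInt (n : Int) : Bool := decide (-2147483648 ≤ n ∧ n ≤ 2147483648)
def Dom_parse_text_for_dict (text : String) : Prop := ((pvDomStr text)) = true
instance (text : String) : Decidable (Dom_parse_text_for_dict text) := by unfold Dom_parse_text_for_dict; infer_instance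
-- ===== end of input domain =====

-- B replaces A's incremental per-line string concatenation into the result dict by grouping
-- content lines into lists keyed by filename and joining each group once at the end (simpler).

-- ===== PORT A =====
-- body of A's 'for line in lines' loop; state = (file_content, current_filename, current_lines)
def pvStepA (st : PySem.Dict String String × Option String × List String) (line : String) :
    PySem.Dict String String × Option String × List String :=
  let st1 :=
    if PySem.Str.startswith line "Filename:" then
      -- line.split(":", 1)[1]: the [1] never raises here since a "Filename:"-prefixed line contains ':'
      let filename := PySem.Str.strip (((PySem.Str.splitMax? line ":" 1).getD []).getD 1 "")
      let filename := PySem.Str.slice filename (some 2) none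
      (st.1, some filename, ([] : List String))
    else
      (st.1, st.2.1, st.2.2 ++ [line])
  match st1.2.1 with
  | some f =>
      if st1.2.2.length > 0 then
        match st1.1.get? f with
        | some v => (st1.1.insert f (v ++ "\n" ++ line), st1.2.1, st1.2.2)
        | none => (st1.1.insert f (PySem.Str.join "\n" st1.2.2), st1.2.1, st1.2.2)
      else st1
  | none => st1

def parse_text_for_dict (text : String) : List (String × String) :=
  (((PySem.Str.split? text "\n").getD []).foldl pvStepA (PySem.Dict.empty, none, [])).1.items

-- ===== PORT B =====
-- body of B's loop; state = (groups, current)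
def pvStepB (st : PySem.Dict String (List String) × Option String) (line : String) :
    PySem.Dict String (List String) × Option String :=
  if PySem.Str.startswith line "Filename:" then
    (st.1, some (PySem.Str.slice (PySem.Str.strip (((PySem.Str.splitMax? line ":" 1).getD []).getD 1 "")) (some 2) none))
  else
    match st.2 with
    | some f => (st.1.modify f [] (· ++ [line]), st.2)  -- groups.setdefault(current, []).append(line)
    | none => st

def parse_text_for_dict_alt (text : String) : List (String × String) :=
  ((((PySem.Str.split? text "\n").getD []).foldl pvStepB (PySem.Dict.empty, none)).1.items).map
    (fun p => (p.1, PySem.Str.join "\n" p.2))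

-- ===== PRECONDITION & SPEC =====
def Spec_parse_text_for_dict (text : String) (out : List (String × String)) : Prop := out = parse_text_for_dict_alt text
instance (text : String) (out : List (String × String)) : Decidable (Spec_parse_text_for_dict text out) := by unfold Spec_parse_text_for_dict; infer_instance

-- ===== CLAIM (what is proved, stated in full; the proofs are below) =====
def Claim_equal_parse_text_for_dict : Prop := ∀ (text : String), Dom_parse_text_for_dict text → Spec_parse_text_for_dict text (parse_text_for_dict text)

-- ===== LEMMAS AND PROOFS =====

-- value-level view of B's grouped dict as A's string dict
def pvJoinItems (l : List (String × List String)) : List (String × String) :=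
  l.map (fun p => (p.1, PySem.Str.join "\n" p.2))

-- invariant tying A's loop state to B's
def pvInv (a : PySem.Dict String String × Option String × List String)
    (b : PySem.Dict String (List String) × Option String) : Prop :=
  a.1.items = pvJoinItems b.1.items ∧
  a.2.1 = b.2 ∧
  (∀ p ∈ b.1.items, p.2 ≠ []) ∧
  (∀ f, a.2.1 = some f → b.1.get? f = none → a.2.2 = [])

lemma pvCharsJoin_append_singleton (sep x : List Char) (l : List (List Char)) (h : l ≠ []) :
    PySem.Chars.join sep (l ++ [x]) = PySem.Chars.join sep l ++ sep ++ x := by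
  induction l with
  | nil => simp at h
  | cons a t ih =>
      cases t with
      | nil => simp [PySem.Chars.join_cons_cons, PySem.Chars.join_singleton]
      | cons b t' =>
          have e1 : a :: b :: t' ++ [x] = a :: b :: (t' ++ [x]) := by simp
          have e2 : b :: (t' ++ [x]) = (b :: t') ++ [x] := by simp
          rw [e1, PySem.Chars.join_cons_cons, e2, ih (by simp)]
          simp [PySem.Chars.join_cons_cons, List.append_assoc]

lemma pvStrJoin_append_singleton (x : String) (l : List String) (h : l ≠ []) :
    PySem.Str.join "\n" (l ++ [x]) = PySem.Str.join "\n" l ++ "\n" ++ x := by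
  simp only [PySem.Str.join, List.map_append, List.map_cons, List.map_nil]
  rw [pvCharsJoin_append_singleton _ _ _ (by simpa using h)]
  apply String.ext
  simp

lemma pvStrJoin_singleton (x : String) : PySem.Str.join "\n" [x] = x := by
  simp [PySem.Str.join, PySem.Chars.join_singleton]

lemma pvGet?_joinItems (l : List (String × List String)) (f : String) :
    (PySem.Dict.mk (pvJoinItems l)).get? f
      = ((PySem.Dict.mk l).get? f).map (PySem.Str.join "\n") := by
  simp [PySem.Dict.get?, pvJoinItems, List.find?_map, Function.comp_def, Option.map_map]

lemma pvContains_joinItems (l : List (String × List String)) (f : String) :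
    (PySem.Dict.mk (pvJoinItems l)).contains f = (PySem.Dict.mk l).contains f := by
  simp [PySem.Dict.contains, pvJoinItems, List.any_map, Function.comp_def]

lemma pvStep_inv (a : PySem.Dict String String × Option String × List String)
    (b : PySem.Dict String (List String) × Option String) (line : String)
    (h : pvInv a b) : pvInv (pvStepA a line) (pvStepB b line) := by
  obtain ⟨h1, h2, h3, h4⟩ := h
  have hAeq : a.1 = PySem.Dict.mk (pvJoinItems b.1.items) := by
    apply PySem.Dict.ext; simpa using h1
  by_cases hs : PySem.Str.startswith line "Filename:" = true
  · -- filename line: nothing is stored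
    simp only [pvStepA, pvStepB, hs, if_true]
    refine ⟨h1, rfl, h3, ?_⟩
    intro f hf hn; rfl
  · -- content line
    simp only [pvStepA, pvStepB, hs, if_false, Bool.false_eq_true]
    cases hcf : a.2.1 with
    | none =>
        rw [← h2, hcf]
        exact ⟨h1, by simpa using hcf.symm ▸ h2.symm ▸ rfl, h3, by intro f hf; simp at hf⟩
    | some f =>
        rw [← h2, hcf]
        have hlen : (a.2.2 ++ [line]).length > 0 := by simp
        simp only [hlen, if_true]
        cases hb : b.1.get? f with
        | none =>
            have hA : a.1.get? f = none := by rw [hAeq, pvGet?_joinItems, hb]; rfl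
            have hcl : a.2.2 = [] := h4 f hcf hb
            have hgD : b.1.getD f [] = [] := by
              simp [PySem.Dict.getD_eq_get?_getD, hb]
            simp only [hA, PySem.Dict.modify, hgD, List.nil_append, hcl]
            have hcont : b.1.contains f = false := by
              rw [PySem.Dict.contains_eq_isSome_get?, hb]; rfl
            have hcontA : a.1.contains f = false := by
              rw [hAeq, pvContains_joinItems, PySem.Dict.contains_eq_isSome_get?, hb]; rfl
            refine ⟨?_, rfl, ?_, ?_⟩
            · simp only [PySem.Dict.insert, hcont, hcontA, Bool.false_eq_true, if_false]
              simp [pvJoinItems, h1, pvStrJoin_singleton]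
            · intro p hp
              simp only [PySem.Dict.insert, hcont, Bool.false_eq_true, if_false] at hp
              simp only [List.mem_append, List.mem_singleton] at hp
              rcases hp with hp | hp
              · exact h3 p hp
              · subst hp; simp
            · intro f' hf' hn
              exfalso
              cases hf'
              rw [PySem.Dict.get?_insert_self] at hn
              simp at hn
        | some w =>
            have hA : a.1.get? f = some (PySem.Str.join "\n" w) := by
              rw [hAeq, pvGet?_joinItems, hb]; rfl
            have hw : w ≠ [] := by
              have hfind : ∃ k, List.find? (fun p => p.1 == f) b.1.items = some (k, w) := by
                simpa [PySem.Dict.get?, Option.map_eq_some_iff] using hb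
              obtain ⟨k, hk⟩ := hfind
              exact h3 (k, w) (List.mem_of_find?_eq_some hk)
            have hgD : b.1.getD f [] = w := by
              simp [PySem.Dict.getD_eq_get?_getD, hb]
            simp only [hA, PySem.Dict.modify, hgD]
            have hcont : b.1.contains f = true := by
              rw [PySem.Dict.contains_eq_isSome_get?, hb]; rfl
            have hcontA : a.1.contains f = true := by
              rw [hAeq, pvContains_joinItems, PySem.Dict.contains_eq_isSome_get?, hb]; rfl
            refine ⟨?_, rfl, ?_, ?_⟩
            · simp only [PySem.Dict.insert, hcont, hcontA, if_true]
              rw [h1]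
              simp only [pvJoinItems, List.map_map]
              apply List.map_congr_left
              intro p hp
              by_cases hpk : (p.1 == f) = true
              · simp [Function.comp, hpk, pvStrJoin_append_singleton line w hw]
              · simp [Function.comp, hpk]
            · intro p hp
              simp only [PySem.Dict.insert, hcont, if_true, List.mem_map] at hp
              rcases hp with ⟨q, hq, hqe⟩
              by_cases hqk : (q.1 == f) = true
              · simp only [hqk, if_true] at hqe; subst hqe; simp
              · simp only [hqk, Bool.false_eq_true, if_false] at hqe
                subst hqe; exact h3 q hq
            · intro f' hf' hn
              exfalso
              cases hf'
              rw [PySem.Dict.get?_insert_self] at hn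
              simp at hn

lemma pvFold_inv (lines : List String)
    (a : PySem.Dict String String × Option String × List String)
    (b : PySem.Dict String (List String) × Option String)
    (h : pvInv a b) : pvInv (lines.foldl pvStepA a) (lines.foldl pvStepB b) := by
  induction lines generalizing a b with
  | nil => exact h
  | cons x t ih => exact ih _ _ (pvStep_inv a b x h)

-- ===== VERDICT (by name: the statement is the Claim_ definition above) =====
theorem parse_text_for_dict_spec : Claim_equal_parse_text_for_dict := by
  intro text _
  unfold Spec_parse_text_for_dict parse_text_for_dict parse_text_for_dict_alt
  have h := pvFold_inv ((PySem.Str.split? text "\n").getD [])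
    (PySem.Dict.empty, none, []) (PySem.Dict.empty, none)
    ⟨rfl, rfl, by intro p hp; simp [PySem.Dict.empty] at hp, by intro f hf; simp at hf⟩
  exact h.1
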